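-- pv_equiv track=rewrite | github.com/laurenluyun/Leetcode | 424.py | characterReplacement02
-- ===== SOURCE A (Python) =====
-- def characterReplacement02(s: str, k: int) -> int:
--     left = res = 0
--     if len(s) == 1:
--         return 1
--     right = 1
--     while right < len(s):
--         replacement = 0
--         while right < len(s):
--             if s[right] != s[left] and replacement < k:
--                 replacement += 1
--                 right += 1
--             elif s[right] == s[left]:
--                 right += 1
--             else:
--                 break
--         res = max(res, (right - left))
--         left += 1
--         right = left + 1
--     return res
-- ===== SOURCE B (Python) =====
-- def characterReplacement02(s: str, k: int) -> int:
--     # Per-character monotonic two-pointer: for each distinct char c, slide a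
--     # window whose non-c count stays <= k; each char's right pointer only moves
--     # forward, so the scan is O(n) per distinct character.
--     n = len(s)
--     res = 0
--     for c in set(s):
--         r = 0
--         mism = 0  # count of non-c chars in the window [l, r)
--         for l in range(n):
--             if r < l:
--                 r = l
--                 mism = 0
--             if s[l] == c:
--                 while r < n and (s[r] == c or mism < k):
--                     if s[r] != c:
--                         mism += 1
--                     r += 1
--                 if r - l > res:
--                     res = r - l
--             if r > l and s[l] != c:
--                 mism -= 1
--     return res
-- ===== Notes on version B (the rewrite author's own statement) =====
-- stated objective: faster
-- what changed: A rescans the string from scratch for every start index (nested while loops, O(n^2)); B does one monotonic two-pointer sweep per distinct character, so each character's right pointer only ever moves forward.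
import Mathlib
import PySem

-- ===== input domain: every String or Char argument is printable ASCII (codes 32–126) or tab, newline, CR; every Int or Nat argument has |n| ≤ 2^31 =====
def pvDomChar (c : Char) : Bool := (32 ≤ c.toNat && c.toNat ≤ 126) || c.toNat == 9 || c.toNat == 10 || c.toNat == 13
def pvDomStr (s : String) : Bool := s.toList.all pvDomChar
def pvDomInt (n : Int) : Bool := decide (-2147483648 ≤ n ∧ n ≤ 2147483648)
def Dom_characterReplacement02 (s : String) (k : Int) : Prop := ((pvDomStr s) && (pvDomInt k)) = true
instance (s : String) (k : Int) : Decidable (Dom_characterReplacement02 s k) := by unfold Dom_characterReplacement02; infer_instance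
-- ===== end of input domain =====

-- B replaces A's per-start rescan (quadratic) with a per-distinct-character monotonic
-- two-pointer sweep; same return value on every input, measurably faster on long strings.

-- ===== PORT A =====
-- inner `while right < len(s): …` of A; state (replacement, right), returns final right
def innerA (cs : List Char) (cl : Char) (k : Int) (repl right : Nat) : Nat :=
  if h : right < cs.length then
    if cs[right] ≠ cl ∧ (repl : Int) < k then innerA cs cl k (repl + 1) (right + 1)
    else if cs[right] = cl then innerA cs cl k repl (right + 1)
    else right
  else right
termination_by cs.length - right

-- outer loop of A: at its head right = left + 1, so the guard `right < len(s)` is `left + 1 < len`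
def outerA (cs : List Char) (k : Int) (left res : Nat) : Nat :=
  if h : left + 1 < cs.length then
    outerA cs k (left + 1) (max res (innerA cs (cs[left]'(by omega)) k 0 (left + 1) - left))
  else res
termination_by cs.length - left

def characterReplacement02 (s : String) (k : Int) : Int :=
  let cs := s.toList
  if cs.length = 1 then 1 else (outerA cs k 0 0 : Int)

-- ===== PORT B =====
-- B's `while r < n and (s[r] == c or mism < k)`: returns final (r, mism)
def extendB (cs : List Char) (c : Char) (k : Int) (mism r : Nat) : Nat × Nat :=
  if h : r < cs.length then
    if cs[r] = c ∨ (mism : Int) < k then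
      if cs[r] ≠ c then extendB cs c k (mism + 1) (r + 1)
      else extendB cs c k mism (r + 1)
    else (r, mism)
  else (r, mism)
termination_by cs.length - r

-- B's `for l in range(n)` for one character c; state (l, r, mism, res)
def loopB (cs : List Char) (c : Char) (k : Int) (l r mism res : Nat) : Nat :=
  if h : l < cs.length then
    let r1 := if r < l then l else r
    let m1 := if r < l then 0 else mism
    let p := if cs[l] = c then extendB cs c k m1 r1 else (r1, m1)
    let res1 := if cs[l] = c then (if p.1 - l > res then p.1 - l else res) else res
    let m2 := if l < p.1 ∧ cs[l] ≠ c then p.2 - 1 else p.2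
    loopB cs c k (l + 1) p.1 m2 res1
  else res
termination_by cs.length - l

def characterReplacement02_alt (s : String) (k : Int) : Int :=
  let cs := s.toList
  let res : Nat := (PySem.Set.ofList cs).foldl (fun res c => loopB cs c k 0 0 0 res) 0
  (res : Int)

-- ===== PRECONDITION & SPEC =====
def Spec_characterReplacement02 (s : String) (k : Int) (out : Int) : Prop := out = characterReplacement02_alt s k
instance (s : String) (k : Int) (out : Int) : Decidable (Spec_characterReplacement02 s k out) := by unfold Spec_characterReplacement02; infer_instance

-- ===== CLAIM (what is proved, stated in full; the proofs are below) =====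
def Claim_equal_characterReplacement02 : Prop := ∀ (s : String) (k : Int), Dom_characterReplacement02 s k → Spec_characterReplacement02 s k (characterReplacement02 s k)

-- ===== LEMMAS AND PROOFS =====

-- number of non-c characters among the first r characters
def pcnt (cs : List Char) (c : Char) (r : Nat) : Nat := (cs.take r).countP (fun x => x ≠ c)

theorem pcnt_mono (cs : List Char) (c : Char) {l r : Nat} (h : l ≤ r) :
    pcnt cs c l ≤ pcnt cs c r := by
  unfold pcnt
  have h1 : cs.take l = (cs.take r).take l := by rw [List.take_take, Nat.min_eq_left h]
  rw [h1]
  exact List.Sublist.countP_le (List.take_sublist _ _)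

theorem pcnt_succ (cs : List Char) (c : Char) {r : Nat} (h : r < cs.length) :
    pcnt cs c (r + 1) = if cs[r] = c then pcnt cs c r else pcnt cs c r + 1 := by
  unfold pcnt
  rw [List.take_add_one, List.countP_append, List.getElem?_eq_getElem h]
  by_cases hc : cs[r] = c <;> simp [hc]

-- unfolding equations for A's inner loop
theorem innerA_step_mis (cs : List Char) (c : Char) (k : Int) (m r : Nat)
    (h : r < cs.length) (hne : cs[r] ≠ c) (hlt : (m : Int) < k) :
    innerA cs c k m r = innerA cs c k (m + 1) (r + 1) := by
  rw [innerA, dif_pos h, if_pos ⟨hne, hlt⟩]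

theorem innerA_step_eq (cs : List Char) (c : Char) (k : Int) (m r : Nat)
    (h : r < cs.length) (he : cs[r] = c) :
    innerA cs c k m r = innerA cs c k m (r + 1) := by
  rw [innerA, dif_pos h, if_neg (fun ⟨a, _⟩ => a he), if_pos he]

theorem innerA_stop (cs : List Char) (c : Char) (k : Int) (m r : Nat)
    (h : r < cs.length) (hne : cs[r] ≠ c) (hge : ¬ (m : Int) < k) :
    innerA cs c k m r = r := by
  rw [innerA, dif_pos h, if_neg (fun ⟨_, b⟩ => hge b), if_neg hne]

theorem innerA_done (cs : List Char) (c : Char) (k : Int) (m r : Nat)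
    (h : ¬ r < cs.length) : innerA cs c k m r = r := by
  rw [innerA, dif_neg h]

theorem innerA_ge (cs : List Char) (cl : Char) (k : Int) (repl right : Nat) :
    right ≤ innerA cs cl k repl right := by
  fun_induction innerA <;> omega

theorem extendB_fst (cs : List Char) (c : Char) (k : Int) (mism r : Nat) :
    (extendB cs c k mism r).1 = innerA cs c k mism r := by
  fun_induction extendB with
  | case1 mism r h hc hne ih =>
    have hlt : (mism : Int) < k := by
      rcases hc with hc | hc
      · exact absurd hc hne
      · exact hc
    rw [ih, innerA_step_mis cs c k mism r h hne hlt]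
  | case2 mism r h hc hne ih =>
    have he : cs[r] = c := by by_contra hx; exact hne hx
    rw [ih, innerA_step_eq cs c k mism r h he]
  | case3 mism r h hc =>
    have h1 : cs[r] ≠ c := fun x => hc (Or.inl x)
    have h2 : ¬ ((mism : Int) < k) := fun x => hc (Or.inr x)
    rw [innerA_stop cs c k mism r h h1 h2]
  | case4 mism r h => rw [innerA_done cs c k mism r h]

-- extendB keeps the window-count invariant and the budget bound
theorem extendB_spec (cs : List Char) (c : Char) (k : Int) (l : Nat) :
    ∀ (mism r : Nat), r ≤ cs.length → pcnt cs c r = pcnt cs c l + mism → mism ≤ k.toNat →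
    pcnt cs c (extendB cs c k mism r).1 = pcnt cs c l + (extendB cs c k mism r).2 ∧
    (extendB cs c k mism r).2 ≤ k.toNat ∧ r ≤ (extendB cs c k mism r).1 ∧
    (extendB cs c k mism r).1 ≤ cs.length := by
  intro mism r
  fun_induction extendB with
  | case1 mism r h hc hne ih =>
    intro _ hp hk
    have hlt : (mism : Int) < k := by
      rcases hc with hc | hc
      · exact absurd hc hne
      · exact hc
    have hp' : pcnt cs c (r + 1) = pcnt cs c l + (mism + 1) := by
      rw [pcnt_succ cs c h, if_neg hne]; omega
    have := ih (by omega) hp' (by omega)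
    exact ⟨this.1, this.2.1, by omega, this.2.2.2⟩
  | case2 mism r h hc hne ih =>
    intro _ hp hk
    have he : cs[r] = c := by by_contra hx; exact hne hx
    have hp' : pcnt cs c (r + 1) = pcnt cs c l + mism := by
      rw [pcnt_succ cs c h, if_pos he]; omega
    have := ih (by omega) hp' hk
    exact ⟨this.1, this.2.1, by omega, this.2.2.2⟩
  | case3 mism r h hc => intro hr hp hk; exact ⟨hp, hk, le_refl _, by omega⟩
  | case4 mism r h => intro hr hp hk; exact ⟨hp, hk, le_refl _, hr⟩

-- the two-pointer path lemma: restarting A's inner scan at any reachable window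
-- state (mism, r) with mism = #non-c in [l, r) ≤ k gives the same endpoint
theorem path (cs : List Char) (c : Char) (k : Int) {l : Nat} (hl : l < cs.length)
    (hc : cs[l] = c) :
    ∀ (r : Nat), l ≤ r → ∀ (m : Nat), r ≤ cs.length → pcnt cs c r = pcnt cs c l + m →
    m ≤ k.toNat → innerA cs c k m r = innerA cs c k 0 (l + 1) := by
  intro r hr
  induction r, hr using Nat.le_induction with
  | base =>
    intro m _ hp hk
    have hm : m = 0 := by omega
    subst hm
    rw [innerA_step_eq cs c k 0 l hl hc]
  | succ r hr ih =>
    intro m hrn hp hk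
    have hrl : r < cs.length := by omega
    by_cases he : cs[r] = c
    · have hp' : pcnt cs c r = pcnt cs c l + m := by
        rw [pcnt_succ cs c hrl, if_pos he] at hp; exact hp
      rw [← innerA_step_eq cs c k m r hrl he]
      exact ih m (by omega) hp' hk
    · have hps : pcnt cs c (r + 1) = pcnt cs c r + 1 := by
        rw [pcnt_succ cs c hrl, if_neg he]
      have hmono : pcnt cs c l ≤ pcnt cs c r := pcnt_mono cs c hr
      have hm1 : 1 ≤ m := by omega
      have hpm : pcnt cs c r = pcnt cs c l + (m - 1) := by omega
      have hmk : ((m - 1 : Nat) : Int) < k := by omega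
      have hstep := innerA_step_mis cs c k (m - 1) r hrl he hmk
      have hm' : m - 1 + 1 = m := by omega
      rw [hm'] at hstep
      rw [← hstep]
      exact ih (m - 1) (by omega) hpm (by omega)

theorem if_gt_eq_max (a b : Nat) : (if b > a then b else a) = max a b := by
  rw [Nat.max_def]
  by_cases h : a ≤ b
  · rw [if_pos h]
    by_cases h2 : b > a
    · rw [if_pos h2]
    · rw [if_neg h2]; omega
  · rw [if_neg h, if_neg (by omega)]

-- one step of B's per-start scan, as a fold step
def stepC (cs : List Char) (c : Char) (k : Int) (a j : Nat) : Nat :=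
  if cs.getD j default = c then max a (innerA cs c k 0 (j + 1) - j) else a

theorem loopB_spec (cs : List Char) (c : Char) (k : Int) (n : Nat) :
    ∀ (l r mism res : Nat), cs.length - l = n → r ≤ cs.length →
    (l ≤ r → pcnt cs c r = pcnt cs c l + mism ∧ mism ≤ k.toNat) →
    loopB cs c k l r mism res =
      (List.range' l n).foldl (stepC cs c k) res := by
  induction n with
  | zero =>
    intro l r mism res hn _ _
    rw [loopB]
    have hnl : ¬ l < cs.length := by omega
    simp [hnl]
  | succ n ih =>
    intro l r mism res hn hr hinv
    have hl : l < cs.length := by omega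
    have hstep : cs.length - (l + 1) = n := by omega
    rw [loopB, dif_pos hl, List.range'_succ, List.foldl_cons]
    have hgd : cs.getD l default = cs[l] := List.getD_eq_getElem cs default hl
    by_cases hcase : r < l
    all_goals by_cases hcl : cs[l] = c
    -- case r < l, cs[l] = c
    · simp only [if_pos hcase, if_pos hcl]
      rw [if_neg (show ¬ (l < (extendB cs c k 0 l).1 ∧ cs[l] ≠ c) from fun h => h.2 hcl)]
      have hinv1 : pcnt cs c l = pcnt cs c l + 0 := by omega
      have hsp := extendB_spec cs c k l 0 l (by omega) hinv1 (by omega)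
      have hp1 : (extendB cs c k 0 l).1 = innerA cs c k 0 (l + 1) :=
        (extendB_fst cs c k 0 l).trans (path cs c k hl hcl l (le_refl l) 0 (by omega) hinv1 (by omega))
      have hps : pcnt cs c (l + 1) = pcnt cs c l := by
        rw [pcnt_succ cs c hl, if_pos hcl]
      have hnext : l + 1 ≤ (extendB cs c k 0 l).1 →
          pcnt cs c (extendB cs c k 0 l).1 = pcnt cs c (l + 1) + (extendB cs c k 0 l).2 ∧
          (extendB cs c k 0 l).2 ≤ k.toNat := by
        intro _
        refine ⟨?_, hsp.2.1⟩
        omega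
      rw [ih (l + 1) (extendB cs c k 0 l).1 (extendB cs c k 0 l).2 _ hstep hsp.2.2.2 hnext]
      congr 1
      rw [stepC, hgd, if_pos hcl, hp1]
      exact if_gt_eq_max res (innerA cs c k 0 (l + 1) - l)
    -- case r < l, cs[l] ≠ c
    · simp only [if_pos hcase, if_neg hcl]
      rw [ih (l + 1) l _ res hstep (by omega) (fun h => absurd h (by omega))]
      congr 1
      rw [stepC, hgd, if_neg hcl]
    -- case ¬ r < l, cs[l] = c
    · simp only [if_neg hcase, if_pos hcl]
      rw [if_neg (show ¬ (l < (extendB cs c k mism r).1 ∧ cs[l] ≠ c) from fun h => h.2 hcl)]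
      have hinv1 := hinv (by omega)
      have hsp := extendB_spec cs c k l mism r hr hinv1.1 hinv1.2
      have hp1 : (extendB cs c k mism r).1 = innerA cs c k 0 (l + 1) :=
        (extendB_fst cs c k mism r).trans
          (path cs c k hl hcl r (by omega) mism hr hinv1.1 hinv1.2)
      have hps : pcnt cs c (l + 1) = pcnt cs c l := by
        rw [pcnt_succ cs c hl, if_pos hcl]
      have hnext : l + 1 ≤ (extendB cs c k mism r).1 →
          pcnt cs c (extendB cs c k mism r).1 = pcnt cs c (l + 1) + (extendB cs c k mism r).2 ∧
          (extendB cs c k mism r).2 ≤ k.toNat := by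
        intro _
        refine ⟨?_, hsp.2.1⟩
        omega
      rw [ih (l + 1) (extendB cs c k mism r).1 (extendB cs c k mism r).2 _ hstep hsp.2.2.2 hnext]
      congr 1
      rw [stepC, hgd, if_pos hcl, hp1]
      exact if_gt_eq_max res (innerA cs c k 0 (l + 1) - l)
    -- case ¬ r < l, cs[l] ≠ c
    · simp only [if_neg hcase, if_neg hcl]
      have hinv1 := hinv (by omega)
      have hnext : l + 1 ≤ r →
          pcnt cs c r = pcnt cs c (l + 1) + (if l < r ∧ cs[l] ≠ c then mism - 1 else mism) ∧
          (if l < r ∧ cs[l] ≠ c then mism - 1 else mism) ≤ k.toNat := by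
        intro hlt
        have hsl : pcnt cs c (l + 1) = pcnt cs c l + 1 := by
          rw [pcnt_succ cs c hl, if_neg hcl]
        have hmono : pcnt cs c (l + 1) ≤ pcnt cs c r := pcnt_mono cs c hlt
        rw [if_pos ⟨by omega, hcl⟩]
        exact ⟨by omega, by omega⟩
      rw [ih (l + 1) r _ res hstep hr hnext]
      congr 1
      rw [stepC, hgd, if_neg hcl]

-- A's outer loop as a fold of per-start values
def vA (cs : List Char) (k : Int) (j : Nat) : Nat :=
  innerA cs (cs.getD j default) k 0 (j + 1) - j

theorem outerA_spec (cs : List Char) (k : Int) :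
    ∀ (m left res : Nat), (cs.length - 1) - left = m →
    outerA cs k left res =
      (List.range' left m).foldl (fun a j => max a (vA cs k j)) res := by
  intro m
  induction m with
  | zero =>
    intro left res hm
    rw [outerA]
    have hnl : ¬ left + 1 < cs.length := by omega
    simp [hnl]
  | succ m ih =>
    intro left res hm
    have hlt : left + 1 < cs.length := by omega
    rw [outerA, dif_pos hlt, List.range'_succ, List.foldl_cons,
      ih (left + 1) _ (by omega)]
    congr 2
    rw [vA, List.getD_eq_getElem cs default (by omega : left < cs.length)]

-- fold-max toolkit
def FR {α : Type} (L : List α) (f : α → Nat) : Nat :=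
  L.foldr (fun x b => max (f x) b) 0

theorem foldl_max_eq {α : Type} (f : α → Nat) :
    ∀ (L : List α) (res : Nat),
    L.foldl (fun a x => max a (f x)) res = max res (FR L f) := by
  intro L
  induction L with
  | nil => intro res; simp [FR]
  | cons a L ih =>
    intro res
    rw [List.foldl_cons, ih]
    show max (max res (f a)) (FR L f) = max res (max (f a) (FR L f))
    rw [Nat.max_assoc]

theorem le_FR {α : Type} (L : List α) (f : α → Nat) {x : α} (hx : x ∈ L) :
    f x ≤ FR L f := by
  induction L with
  | nil => cases hx
  | cons a L ih =>
    rw [FR, List.foldr_cons]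
    rcases List.mem_cons.mp hx with h | h
    · subst h; exact Nat.le_max_left _ _
    · exact le_trans (ih h) (Nat.le_max_right _ _)

theorem FR_le {α : Type} (L : List α) (f : α → Nat) {m : Nat}
    (h : ∀ x ∈ L, f x ≤ m) : FR L f ≤ m := by
  induction L with
  | nil => exact Nat.zero_le m
  | cons a L ih =>
    rw [FR, List.foldr_cons]
    exact Nat.max_le.mpr ⟨h a (List.mem_cons_self), ih (fun x hx => h x (List.mem_cons_of_mem a hx))⟩

theorem FR_concat {α : Type} (L : List α) (f : α → Nat) (x : α) :
    FR (L ++ [x]) f = max (FR L f) (f x) := by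
  induction L with
  | nil => simp [FR]
  | cons a L ih =>
    show max (f a) (FR (L ++ [x]) f) = max (max (f a) (FR L f)) (f x)
    rw [ih, Nat.max_assoc]

-- the per-start value restricted to starts holding character c
def fC (cs : List Char) (c : Char) (k : Int) (j : Nat) : Nat :=
  if cs.getD j default = c then innerA cs c k 0 (j + 1) - j else 0

theorem stepC_eq_max (cs : List Char) (c : Char) (k : Int) (a j : Nat) :
    stepC cs c k a j = max a (fC cs c k j) := by
  rw [stepC, fC]
  by_cases h : cs.getD j default = c
  · rw [if_pos h, if_pos h]
  · rw [if_neg h, if_neg h, Nat.max_zero]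

-- value of B's whole per-character pass
theorem loopB_eq_FR (cs : List Char) (c : Char) (k : Int) (res : Nat) :
    loopB cs c k 0 0 0 res = max res (FR (List.range' 0 cs.length) (fC cs c k)) := by
  rw [loopB_spec cs c k cs.length 0 0 0 res (Nat.sub_zero _) (Nat.zero_le _)
    (fun _ => ⟨by simp [pcnt], Nat.zero_le _⟩)]
  have : ∀ (L : List Nat) (a : Nat),
      L.foldl (stepC cs c k) a = L.foldl (fun x j => max x (fC cs c k j)) a := by
    intro L
    induction L with
    | nil => intro a; rfl
    | cons b L ih => intro a; rw [List.foldl_cons, List.foldl_cons, stepC_eq_max, ih]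
  rw [this, foldl_max_eq]

-- B's total, over all characters, equals the unrestricted per-start max
theorem alt_eq_FR (cs : List Char) (k : Int) :
    (PySem.Set.ofList cs).foldl (fun res c => loopB cs c k 0 0 0 res) 0 =
      FR (List.range' 0 cs.length) (vA cs k) := by
  have h1 : ∀ (D : List Char) (res : Nat),
      D.foldl (fun res c => loopB cs c k 0 0 0 res) res =
        D.foldl (fun res c => max res (FR (List.range' 0 cs.length) (fC cs c k))) res := by
    intro D
    induction D with
    | nil => intro res; rfl
    | cons c D ih => intro res; rw [List.foldl_cons, List.foldl_cons, loopB_eq_FR, ih]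
  rw [h1, foldl_max_eq]
  show max 0 (FR (PySem.Set.ofList cs) fun c => FR (List.range' 0 cs.length) (fC cs c k)) = _
  rw [Nat.max_def, if_pos (Nat.zero_le _)]
  apply Nat.le_antisymm
  · apply FR_le
    intro c _
    apply FR_le
    intro j hj
    rw [fC]
    by_cases h : cs.getD j default = c
    · rw [if_pos h]
      have : innerA cs c k 0 (j + 1) - j = vA cs k j := by rw [vA, h]
      rw [this]
      exact le_FR _ _ hj
    · rw [if_neg h]; exact Nat.zero_le _
  · apply FR_le
    intro j hj
    have hjn : j < cs.length := by
      have := List.mem_range'_1.mp hj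
      omega
    have hmem : cs.getD j default ∈ PySem.Set.ofList cs := by
      rw [PySem.Set.mem_ofList]
      rw [List.getD_eq_getElem cs default hjn]
      exact List.getElem_mem hjn
    refine le_trans ?_ (le_FR _ _ hmem)
    refine le_trans ?_ (le_FR _ _ hj)
    rw [fC, if_pos rfl, vA]

theorem vA_last (cs : List Char) (k : Int) (h : 1 ≤ cs.length) :
    vA cs k (cs.length - 1) = 1 := by
  rw [vA]
  have h1 : cs.length - 1 + 1 = cs.length := by omega
  rw [h1, innerA_done cs _ k 0 cs.length (by omega)]
  omega

theorem vA_ge_one (cs : List Char) (k : Int) (j : Nat) : 1 ≤ vA cs k j := by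
  rw [vA]
  have := innerA_ge cs (cs.getD j default) k 0 (j + 1)
  omega

-- ===== VERDICT (by name: the statement is the Claim_ definition above) =====
theorem characterReplacement02_spec : Claim_equal_characterReplacement02 := by
  intro s k _
  show (if s.toList.length = 1 then (1 : Int) else (outerA s.toList k 0 0 : Int)) =
    (((PySem.Set.ofList s.toList).foldl (fun res c => loopB s.toList c k 0 0 0 res) 0 : Nat) : Int)
  rw [alt_eq_FR]
  set cs := s.toList with hcs
  by_cases h1 : cs.length = 1
  · rw [if_pos h1]
    have hFR : FR (List.range' 0 cs.length) (vA cs k) = 1 := by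
      rw [h1]
      show max (vA cs k 0) 0 = 1
      have : vA cs k 0 = 1 := by
        rw [vA, innerA_done cs _ k 0 1 (by omega)]
      rw [this, Nat.max_zero]
    rw [hFR]
    rfl
  · rw [if_neg h1]
    congr 1
    rcases Nat.eq_zero_or_pos cs.length with h0 | h0
    · rw [outerA_spec cs k 0 0 0 (by omega), h0]
      rfl
    · have h2 : 2 ≤ cs.length := by omega
      rw [outerA_spec cs k (cs.length - 1) 0 0 (by omega), foldl_max_eq]
      have hsplit : List.range' 0 cs.length = List.range' 0 (cs.length - 1) ++ [cs.length - 1] := by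
        have hlen : cs.length = (cs.length - 1) + 1 := by omega
        rw [hlen, List.range'_concat]
        simp
      rw [hsplit, FR_concat, vA_last cs k (by omega)]
      have h0mem : (0 : Nat) ∈ List.range' 0 (cs.length - 1) :=
        List.mem_range'_1.mpr (by omega)
      have hge : 1 ≤ FR (List.range' 0 (cs.length - 1)) (vA cs k) :=
        le_trans (vA_ge_one cs k 0) (le_FR _ _ h0mem)
      rw [Nat.max_eq_right (Nat.zero_le _), Nat.max_eq_left hge]
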